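-- pv_equiv track=rewrite | github.com/mitsuo0114/competitive_programming | python/atcoder/Beginner049/C.py | solve
-- ===== SOURCE A (Python) =====
-- def solve(S):
--     S = S[::-1]
--     for _ in range(len(S) // 5 + 1):
--         if S[:5] == "dream"[::-1]:
--             S = S[5:]
--         if S[:5] == "erase"[::-1]:
--             S = S[5:]
--         if S[:6] == "eraser"[::-1]:
--             S = S[6:]
--         if S[:7] == "dreamer"[::-1]:
--             S = S[7:]
--     if len(S):
--         return "NO"
--     else:
--         return "YES"
-- ===== SOURCE B (Python) =====
-- def solve(S):
--     # One-line change: instead of repeatedly slicing (re-copying) the string, reverse once and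
--     # walk it with an index pointer, greedily matching the reversed words - O(n) single pass.
--     T = S[::-1]
--     n = len(T)
--     i = 0
--     while i < n:
--         if T.startswith("maerd", i):      # "dream"[::-1]
--             i += 5
--         elif T.startswith("esare", i):    # "erase"[::-1]
--             i += 5
--         elif T.startswith("resare", i):   # "eraser"[::-1]
--             i += 6
--         elif T.startswith("remaerd", i):  # "dreamer"[::-1]
--             i += 7
--         else:
--             return "NO"
--     return "YES"
-- ===== Notes on version B (the rewrite author's own statement) =====
-- stated objective: faster
-- what changed: A repeatedly slices and reassigns the string (each strip copies the remainder, O(n^2) total); B reverses once and greedily advances an index pointer with startswith, a single O(n) pass with no copies.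
import Mathlib
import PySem

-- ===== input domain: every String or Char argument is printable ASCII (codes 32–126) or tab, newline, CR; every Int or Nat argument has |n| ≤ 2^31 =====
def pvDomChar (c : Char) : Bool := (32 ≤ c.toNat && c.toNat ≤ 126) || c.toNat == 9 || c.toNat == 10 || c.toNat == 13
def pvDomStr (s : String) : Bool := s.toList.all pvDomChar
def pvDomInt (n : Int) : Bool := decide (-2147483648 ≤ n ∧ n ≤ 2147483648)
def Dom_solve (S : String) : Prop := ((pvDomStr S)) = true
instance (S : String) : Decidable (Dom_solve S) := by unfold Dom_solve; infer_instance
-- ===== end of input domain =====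

-- B reverses once and scans with an index pointer (one pass, no re-slicing) instead of A's
-- repeated slice-and-reassign loop; the return values are proved equal for every input.

-- the four reversed words, as Python evaluates them: "dream"[::-1], "erase"[::-1], "eraser"[::-1], "dreamer"[::-1]
def wDream : List Char := ['m','a','e','r','d']
def wErase : List Char := ['e','s','a','r','e']
def wEraser : List Char := ['r','e','s','a','r','e']
def wDreamer : List Char := ['r','e','m','a','e','r','d']

-- ===== PORT A =====
-- one iteration of A's loop body: four sequential `if S[:k] == w: S = S[k:]`
def stepA (s : List Char) : List Char :=
  let s := if PySem.List.slice s none (some 5) = wDream then PySem.List.slice s (some 5) none else s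
  let s := if PySem.List.slice s none (some 5) = wErase then PySem.List.slice s (some 5) none else s
  let s := if PySem.List.slice s none (some 6) = wEraser then PySem.List.slice s (some 6) none else s
  let s := if PySem.List.slice s none (some 7) = wDreamer then PySem.List.slice s (some 7) none else s
  s

def solve (S : String) : String :=
  -- S = S[::-1]  (a step -1 slice is reverse: PySem.List.slice?_none_none_neg_one)
  let s := S.toList.reverse
  -- for _ in range(len(S) // 5 + 1): <loop body>
  let r := (PySem.List.pyRange 0 (PySem.Int.floordiv (s.length : Int) 5 + 1) 1).foldl
             (fun t _ => stepA t) s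
  -- if len(S): return "NO" else: return "YES"
  if r.length ≠ 0 then "NO" else "YES"

-- ===== PORT B =====
-- the while loop of Source B: T fixed, index pointer i; T.startswith(w, i) is `startswith (T.drop i) w` (exact here since i ≥ 0)
def goB (T : List Char) (i : Nat) : String :=
  if h : i < T.length then
    if PySem.Chars.startswith (T.drop i) wDream then goB T (i + 5)
    else if PySem.Chars.startswith (T.drop i) wErase then goB T (i + 5)
    else if PySem.Chars.startswith (T.drop i) wEraser then goB T (i + 6)
    else if PySem.Chars.startswith (T.drop i) wDreamer then goB T (i + 7)
    else "NO"
  else "YES"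
termination_by T.length - i
decreasing_by all_goals omega

def solve_alt (S : String) : String :=
  -- T = S[::-1]; i = 0; while i < n: …
  goB S.toList.reverse 0

-- ===== PRECONDITION & SPEC =====
def Spec_solve (S : String) (out : String) : Prop := out = solve_alt S
instance (S : String) (out : String) : Decidable (Spec_solve S out) := by unfold Spec_solve; infer_instance

-- ===== CLAIM (what is proved, stated in full; the proofs are below) =====
def Claim_equal_solve : Prop := ∀ (S : String), Dom_solve S → Spec_solve S (solve S)

-- ===== LEMMAS AND PROOFS =====

-- greedy consumption of the reversed remainder, by structural recursion (proof-side model of B)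
def gB (l : List Char) : String :=
  if hnil : l = [] then "YES"
  else if l.take 5 = wDream then gB (l.drop 5)
  else if l.take 5 = wErase then gB (l.drop 5)
  else if l.take 6 = wEraser then gB (l.drop 6)
  else if l.take 7 = wDreamer then gB (l.drop 7)
  else "NO"
termination_by l.length
decreasing_by
  all_goals
    have : 0 < l.length := List.length_pos_iff.mpr hnil
    simp; omega

-- one conditional strip, the shape of each stage of stepA
def stage (k : Nat) (w : List Char) (x : List Char) : List Char :=
  if x.take k = w then x.drop k else x

lemma stepA_eq (s : List Char) :
    stepA s = stage 7 wDreamer (stage 6 wEraser (stage 5 wErase (stage 5 wDream s))) := by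
  simp only [stepA, stage,
    PySem.List.slice_to _ (by norm_num : (0:Int) ≤ 5),
    PySem.List.slice_to _ (by norm_num : (0:Int) ≤ 6),
    PySem.List.slice_to _ (by norm_num : (0:Int) ≤ 7),
    PySem.List.slice_from _ (by norm_num : (0:Int) ≤ 5),
    PySem.List.slice_from _ (by norm_num : (0:Int) ≤ 6),
    PySem.List.slice_from _ (by norm_num : (0:Int) ≤ 7)]
  norm_num [show Int.toNat 5 = 5 from rfl, show Int.toNat 6 = 6 from rfl, show Int.toNat 7 = 7 from rfl]

-- any of the four words matching at the front of l
def condA (l : List Char) : Prop :=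
  l.take 5 = wDream ∨ l.take 5 = wErase ∨ l.take 6 = wEraser ∨ l.take 7 = wDreamer

lemma take_eq_le {x w : List Char} {k : Nat} (h : x.take k = w) (hw : w.length = k) :
    k ≤ x.length := by
  have := congrArg List.length h
  simp [hw] at this
  omega

lemma stage_length_le (k : Nat) (w x : List Char) : (stage k w x).length ≤ x.length := by
  unfold stage; split_ifs <;> simp

-- derived front facts when a longer word matches
lemma eraser_front {l : List Char} (h : l.take 6 = wEraser) :
    l.take 5 = ['r','e','s','a','r'] := by
  have := congrArg (List.take 5) h
  rwa [List.take_take, show min 5 6 = 5 by norm_num, show wEraser.take 5 = ['r','e','s','a','r'] by decide] at this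

lemma dreamer_front5 {l : List Char} (h : l.take 7 = wDreamer) :
    l.take 5 = ['r','e','m','a','e'] := by
  have := congrArg (List.take 5) h
  rwa [List.take_take, show min 5 7 = 5 by norm_num, show wDreamer.take 5 = ['r','e','m','a','e'] by decide] at this

lemma dreamer_front6 {l : List Char} (h : l.take 7 = wDreamer) :
    l.take 6 = ['r','e','m','a','e','r'] := by
  have := congrArg (List.take 6) h
  rwa [List.take_take, show min 6 7 = 6 by norm_num, show wDreamer.take 6 = ['r','e','m','a','e','r'] by decide] at this

lemma shrink_of_cond {l : List Char} (h : condA l) : (stepA l).length + 5 ≤ l.length := by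
  rw [stepA_eq]
  rcases h with h | h | h | h
  · have h5 : 5 ≤ l.length := take_eq_le h (by decide)
    have := stage_length_le 7 wDreamer (stage 6 wEraser (stage 5 wErase (l.drop 5)))
    have := stage_length_le 6 wEraser (stage 5 wErase (l.drop 5))
    have := stage_length_le 5 wErase (l.drop 5)
    rw [show stage 5 wDream l = l.drop 5 by unfold stage; rw [if_pos h]]
    simp at *; omega
  · have h5 : 5 ≤ l.length := take_eq_le h (by decide)
    rw [show stage 5 wDream l = l by unfold stage; rw [if_neg (by rw [h]; decide)]]
    have := stage_length_le 7 wDreamer (stage 6 wEraser (l.drop 5))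
    have := stage_length_le 6 wEraser (l.drop 5)
    rw [show stage 5 wErase l = l.drop 5 by unfold stage; rw [if_pos h]]
    simp at *; omega
  · have h6 : 6 ≤ l.length := take_eq_le h (by decide)
    have hf := eraser_front h
    rw [show stage 5 wDream l = l by unfold stage; rw [if_neg (by rw [hf]; decide)]]
    rw [show stage 5 wErase l = l by unfold stage; rw [if_neg (by rw [hf]; decide)]]
    have := stage_length_le 7 wDreamer (l.drop 6)
    rw [show stage 6 wEraser l = l.drop 6 by unfold stage; rw [if_pos h]]
    simp at *; omega
  · have h7 : 7 ≤ l.length := take_eq_le h (by decide)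
    have hf5 := dreamer_front5 h
    have hf6 := dreamer_front6 h
    rw [show stage 5 wDream l = l by unfold stage; rw [if_neg (by rw [hf5]; decide)]]
    rw [show stage 5 wErase l = l by unfold stage; rw [if_neg (by rw [hf5]; decide)]]
    rw [show stage 6 wEraser l = l by unfold stage; rw [if_neg (by rw [hf6]; decide)]]
    rw [show stage 7 wDreamer l = l.drop 7 by unfold stage; rw [if_pos h]]
    simp; omega

lemma stepA_of_not_cond {l : List Char} (h : ¬ condA l) : stepA l = l := by
  unfold condA at h
  push Not at h
  obtain ⟨h1, h2, h3, h4⟩ := h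
  rw [stepA_eq]
  unfold stage
  rw [if_neg h1, if_neg h2, if_neg h3, if_neg h4]

lemma shrink_of_ne {l : List Char} (h : stepA l ≠ l) : (stepA l).length + 5 ≤ l.length := by
  by_cases hc : condA l
  · exact shrink_of_cond hc
  · exact absurd (stepA_of_not_cond hc) h

lemma not_cond_of_fix {l : List Char} (h : stepA l = l) : ¬ condA l := by
  intro hc
  have := shrink_of_cond hc
  rw [h] at this
  omega

-- gB facts ---------------------------------------------------------------

lemma gB_nil : gB [] = "YES" := by rw [gB]; rfl

lemma gB_of_not_cond {l : List Char} (h0 : l ≠ []) (h : ¬ condA l) : gB l = "NO" := by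
  unfold condA at h
  push Not at h
  obtain ⟨h1, h2, h3, h4⟩ := h
  rw [gB]
  rw [dif_neg h0, if_neg h1, if_neg h2, if_neg h3, if_neg h4]

lemma ne_nil_of_take {l w : List Char} {k : Nat} (h : l.take k = w) (hw : w ≠ []) : l ≠ [] := by
  intro hl; rw [hl] at h; simp at h; exact hw h

lemma gB_dream {l : List Char} (h : l.take 5 = wDream) : gB l = gB (l.drop 5) := by
  rw [gB, dif_neg (ne_nil_of_take h (by decide)), if_pos h]

lemma gB_erase {l : List Char} (h : l.take 5 = wErase) : gB l = gB (l.drop 5) := by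
  rw [gB, dif_neg (ne_nil_of_take h (by decide)), if_neg (by rw [h]; decide), if_pos h]

lemma gB_eraser {l : List Char} (h : l.take 6 = wEraser) : gB l = gB (l.drop 6) := by
  have hf := eraser_front h
  rw [gB, dif_neg (ne_nil_of_take h (by decide)), if_neg (by rw [hf]; decide),
      if_neg (by rw [hf]; decide), if_pos h]

lemma gB_dreamer {l : List Char} (h : l.take 7 = wDreamer) : gB l = gB (l.drop 7) := by
  have hf5 := dreamer_front5 h
  have hf6 := dreamer_front6 h
  rw [gB, dif_neg (ne_nil_of_take h (by decide)), if_neg (by rw [hf5]; decide),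
      if_neg (by rw [hf5]; decide), if_neg (by rw [hf6]; decide), if_pos h]

lemma gB_stepA (l : List Char) : gB (stepA l) = gB l := by
  rw [stepA_eq]
  have st : ∀ (k : Nat) (w x : List Char),
      (x.take k = w → gB x = gB (x.drop k)) → gB (stage k w x) = gB x := by
    intro k w x hw
    unfold stage
    split_ifs with h
    · exact (hw h).symm
    · rfl
  rw [st 7 wDreamer _ (fun h => gB_dreamer h),
      st 6 wEraser _ (fun h => gB_eraser h),
      st 5 wErase _ (fun h => gB_erase h),
      st 5 wDream _ (fun h => gB_dream h)]

lemma gB_iter (m : Nat) (l : List Char) : gB (stepA^[m] l) = gB l := by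
  induction m generalizing l with
  | zero => rfl
  | succ m ih => rw [Function.iterate_succ_apply, ih, gB_stepA]

lemma iterate_stuck (m : Nat) (l : List Char) (h : l.length ≤ 5 * m) :
    stepA (stepA^[m] l) = stepA^[m] l := by
  induction m generalizing l with
  | zero =>
    have hnil : l = [] := by
      cases l with
      | nil => rfl
      | cons a t => simp at h
    subst hnil
    have : stepA [] = [] := stepA_of_not_cond (by unfold condA; decide)
    simpa using this
  | succ m ih =>
    by_cases hf : stepA l = l
    · rw [Function.iterate_fixed hf]; exact hf
    · have hs := shrink_of_ne hf
      rw [Function.iterate_succ_apply]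
      exact ih (stepA l) (by omega)

lemma gB_of_fix {l : List Char} (h : stepA l = l) :
    gB l = if l = [] then "YES" else "NO" := by
  by_cases h0 : l = []
  · simp [h0, gB_nil]
  · rw [if_neg h0]
    exact gB_of_not_cond h0 (not_cond_of_fix h)

-- startswith and the take form of the conditions
lemma sw_iff (s w : List Char) (k : Nat) (hw : w.length = k) :
    PySem.Chars.startswith s w = true ↔ s.take k = w := by
  rw [PySem.Chars.startswith_iff, List.prefix_iff_eq_take, hw, eq_comm]

-- B's while loop computes the greedy consumption of the remaining suffix
lemma goB_eq_gB (T : List Char) : ∀ (k i : Nat), T.length - i ≤ k → goB T i = gB (T.drop i) := by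
  intro k
  induction k with
  | zero =>
    intro i hi
    have hge : ¬ i < T.length := by omega
    rw [goB, dif_neg hge, List.drop_eq_nil_of_le (by omega), gB_nil]
  | succ k ih =>
    intro i hi
    by_cases hlt : i < T.length
    · have hne : T.drop i ≠ [] := by
        intro hc
        have := congrArg List.length hc
        simp at this; omega
      rw [goB, dif_pos hlt]
      rw [gB, dif_neg hne]
      simp only [sw_iff _ wDream 5 (by decide), sw_iff _ wErase 5 (by decide),
        sw_iff _ wEraser 6 (by decide), sw_iff _ wDreamer 7 (by decide)]
      have hd : ∀ j : Nat, (T.drop i).drop j = T.drop (i + j) := by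
        intro j; rw [List.drop_drop, Nat.add_comm]
      split_ifs with h1 h2 h3 h4
      · rw [ih (i + 5) (by omega), hd 5]
      · rw [ih (i + 5) (by omega), hd 5]
      · rw [ih (i + 6) (by omega), hd 6]
      · rw [ih (i + 7) (by omega), hd 7]
      · rfl
    · rw [goB, dif_neg hlt, List.drop_eq_nil_of_le (by omega), gB_nil]

-- A's fold over range(…) is an iterate of the loop body
lemma foldl_const_iterate {α β : Type} (f : α → α) (xs : List β) (init : α) :
    xs.foldl (fun s _ => f s) init = f^[xs.length] init := by
  induction xs generalizing init with
  | nil => rfl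
  | cons x xs ih => simp [List.foldl_cons, ih, Function.iterate_succ_apply]

-- ===== VERDICT (by name: the statement is the Claim_ definition above) =====
theorem solve_spec : Claim_equal_solve := by
  intro S _
  unfold Spec_solve solve solve_alt
  dsimp only
  set l := S.toList.reverse with hl
  set n := l.length with hn
  have hflo : PySem.Int.floordiv (n : Int) 5 = ((n / 5 : Nat) : Int) := by
    exact_mod_cast PySem.Int.floordiv_natCast n 5
  have hlen : (PySem.List.pyRange 0 ((n / 5 : Nat) + 1 : Int) 1).length = n / 5 + 1 := by
    rw [PySem.List.length_pyRange_one]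
    omega
  rw [hflo]
  rw [foldl_const_iterate stepA _ l, hlen]
  set m := n / 5 + 1 with hm
  have hstuck := iterate_stuck m l (by omega)
  have hgb : gB (stepA^[m] l) = gB l := gB_iter m l
  have hfix := gB_of_fix hstuck
  have halt : goB l 0 = gB l := by
    rw [goB_eq_gB l n 0 (by omega)]
    simp
  by_cases hr : stepA^[m] l = []
  · rw [hr] at hfix hgb
    rw [hr]
    simp [halt, ← hgb, hfix]
  · rw [if_neg hr] at hfix
    rw [if_pos (by simpa using hr)]
    rw [halt, ← hgb, hfix]
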